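-- pv_equiv track=rewrite | github.com/sticky-ai/Algorithms | arcade/graphs/efficientRoadNetwork.py | efficientRoadNetwork
-- ===== SOURCE A (Python) =====
-- from collections import defaultdict as ddict
--
-- def efficientRoadNetwork(n, roads):
--     v = ddict(set)
--
--     for r in roads:
--         v[r[0]].add(r[1])
--         v[r[1]].add(r[0])
--
--     for i in range(n):
--         for j in range(i+1, n):
--             if i in v[j] or j in v[i] or len(v[i] & v[j]) >= 1:
--                 continue
--             else:
--                 return False
--     return True
-- ===== SOURCE B (Python) =====
-- def efficientRoadNetwork(n, roads):
--     # Per-node two-hop coverage instead of per-pair tests: for each node i,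
--     # union the one-hop bitmasks of i's closed neighbourhood and check that
--     # it covers all of range(n).  No pairwise intersections at all.
--     adj = {}
--     for r in roads:
--         for a, b in ((r[0], r[1]), (r[1], r[0])):
--             adj.setdefault(a, []).append(b)
--
--     def low(x):
--         return 1 << x if 0 <= x < n else 0
--
--     one = {}
--     for u, nbrs in adj.items():
--         m = 0
--         for w in nbrs:
--             m |= low(w)
--         one[u] = m
--
--     full = (1 << max(n, 0)) - 1
--     for i in range(n):
--         m = low(i) | one.get(i, 0)
--         for u in adj.get(i, []):
--             m |= low(u) | one.get(u, 0)
--         if m != full: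
--             return False
--     return True
-- ===== Notes on version B (the rewrite author's own statement) =====
-- stated objective: alternative
-- what changed: B replaces A's O(n^2) pairwise adjacent-or-common-neighbor set tests by a per-node two-hop union: it precomputes a one-hop bitmask per node, then for each node ORs the masks of its closed neighbourhood and checks the union covers range(n), doing no pair tests or set intersections at all.
import Mathlib
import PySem

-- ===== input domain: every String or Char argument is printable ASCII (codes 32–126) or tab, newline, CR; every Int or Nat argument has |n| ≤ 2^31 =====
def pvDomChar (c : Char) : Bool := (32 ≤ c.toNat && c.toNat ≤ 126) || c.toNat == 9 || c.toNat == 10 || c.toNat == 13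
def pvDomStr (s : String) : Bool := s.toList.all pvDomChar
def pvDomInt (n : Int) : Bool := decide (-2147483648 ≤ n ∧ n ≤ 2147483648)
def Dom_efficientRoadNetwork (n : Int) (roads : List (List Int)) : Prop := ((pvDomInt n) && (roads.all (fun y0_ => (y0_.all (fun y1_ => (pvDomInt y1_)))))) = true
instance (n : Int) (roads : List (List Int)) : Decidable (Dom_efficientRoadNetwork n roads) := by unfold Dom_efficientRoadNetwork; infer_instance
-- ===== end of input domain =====

-- B replaces A's pairwise adjacent-or-common-neighbour tests by a per-node two-hop
-- union: one precomputed one-hop bitmask per node, then for each node the union of the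
-- masks of its closed neighbourhood is checked to cover range(n) (objective: alternative).

-- ===== PORT A =====
-- r[k] (k = 0, 1; total under Pre_: every road has length ≥ 2)
def pvItem (r : List Int) (k : Int) : Int := PySem.List.pyGetD r k 0

-- v[r[0]].add(r[1]); v[r[1]].add(r[0])  on the defaultdict(set) v
def pvAddRoad (d : PySem.Dict Int (PySem.Set Int)) (r : List Int) : PySem.Dict Int (PySem.Set Int) :=
  (d.modify (pvItem r 0) [] (fun s => PySem.Set.add s (pvItem r 1))).modify
    (pvItem r 1) [] (fun s => PySem.Set.add s (pvItem r 0))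

-- 'i in v[j] or j in v[i] or len(v[i] & v[j]) >= 1'; the reads v[i] / v[j] are ported
-- as getD _ []: the defaultdict inserts an empty set there, which no later read can observe
def pvCheckA (v : PySem.Dict Int (PySem.Set Int)) (i j : Int) : Bool :=
  PySem.Set.contains (v.getD j []) i || PySem.Set.contains (v.getD i []) j ||
    decide (1 ≤ PySem.Set.len (PySem.Set.inter (v.getD i []) (v.getD j [])))

-- 'for j in range(i+1, n)' with the early 'return False': the loop is a structural
-- recursion on the remaining trip count (Python's range is lazy, so the loop must not
-- materialise a list for huge n)
def pvInnerA (v : PySem.Dict Int (PySem.Set Int)) (i : Int) : Nat → Int → Bool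
  | 0, _ => true
  | fuel + 1, j => if pvCheckA v i j then pvInnerA v i fuel (j + 1) else false

-- 'for i in range(n)'
def pvOuterA (v : PySem.Dict Int (PySem.Set Int)) (n : Int) : Nat → Int → Bool
  | 0, _ => true
  | fuel + 1, i =>
    if pvInnerA v i (n - (i + 1)).toNat (i + 1) then pvOuterA v n fuel (i + 1) else false

def efficientRoadNetwork (n : Int) (roads : List (List Int)) : Bool :=
  pvOuterA (roads.foldl pvAddRoad PySem.Dict.empty) n n.toNat 0

-- ===== PORT B =====
-- the inner generator '(r[0], r[1]), (r[1], r[0])' flattened over roads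
def pvPairs (roads : List (List Int)) : List (Int × Int) :=
  roads.flatMap (fun r => [(pvItem r 0, pvItem r 1), (pvItem r 1, pvItem r 0)])

-- adj.setdefault(a, []).append(b) over those pairs
def pvAdjB (roads : List (List Int)) : PySem.Dict Int (List Int) :=
  (pvPairs roads).foldl (fun d p => d.modify p.1 [] (fun l => l ++ [p.2])) PySem.Dict.empty

-- low(x) = 1 << x if 0 <= x < n else 0  (Python masks are nonnegative ints: Nat is exact)
def pvLow (n x : Int) : Nat := if 0 ≤ x ∧ x < n then 1 <<< x.toNat else 0

-- m = 0; for w in nbrs: m |= low(w)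
def pvOrm (n : Int) (nbrs : List Int) : Nat :=
  nbrs.foldl (fun m w => m ||| pvLow n w) 0

-- the 'one = {}; for u, nbrs in adj.items(): … one[u] = m' loop
def pvOneB (n : Int) (adj : PySem.Dict Int (List Int)) : PySem.Dict Int Nat :=
  adj.items.foldl (fun d p => d.insert p.1 (pvOrm n p.2)) PySem.Dict.empty

-- m = low(i) | one.get(i, 0); for u in adj.get(i, []): m |= low(u) | one.get(u, 0)
def pvRow (n : Int) (adj : PySem.Dict Int (List Int)) (one : PySem.Dict Int Nat) (i : Int) : Nat :=
  (adj.getD i []).foldl (fun m u => m ||| (pvLow n u ||| one.getD u 0))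
    (pvLow n i ||| one.getD i 0)

-- 'for i in range(n): … if m != full: return False' (lazy range → fuel recursion)
def pvLoopB (n : Int) (adj : PySem.Dict Int (List Int)) (one : PySem.Dict Int Nat)
    (full : Nat) : Nat → Int → Bool
  | 0, _ => true
  | fuel + 1, i =>
    if pvRow n adj one i = full then pvLoopB n adj one full fuel (i + 1) else false

-- full = (1 << max(n, 0)) - 1  (Int.toNat is exactly max n 0)
def efficientRoadNetwork_alt (n : Int) (roads : List (List Int)) : Bool :=
  let adj := pvAdjB roads
  let one := pvOneB n adj
  pvLoopB n adj one ((1 <<< n.toNat) - 1) n.toNat 0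

-- ===== PRECONDITION & SPEC =====
-- Pre_: every road must have at least two entries; on a shorter road A raises IndexError.
def Pre_efficientRoadNetwork (n : Int) (roads : List (List Int)) : Prop :=
  ∀ r ∈ roads, 2 ≤ r.length

instance (n : Int) (roads : List (List Int)) : Decidable (Pre_efficientRoadNetwork n roads) := by
  unfold Pre_efficientRoadNetwork; infer_instance

def pvWitness_efficientRoadNetwork : Int × List (List Int) := (3, [[0, 1], [1, 2]])

def Spec_efficientRoadNetwork (n : Int) (roads : List (List Int)) (out : Bool) : Prop :=
  out = efficientRoadNetwork_alt n roads
instance (n : Int) (roads : List (List Int)) (out : Bool) : Decidable (Spec_efficientRoadNetwork n roads out) := by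
  unfold Spec_efficientRoadNetwork; infer_instance

-- ===== CLAIM (what is proved, stated in full; the proofs are below) =====
def Claim_equal_efficientRoadNetwork : Prop := ∀ (n : Int) (roads : List (List Int)), Dom_efficientRoadNetwork n roads → Pre_efficientRoadNetwork n roads → Spec_efficientRoadNetwork n roads (efficientRoadNetwork n roads)

-- ===== LEMMAS AND PROOFS =====

-- abstract adjacency: x and y are the two endpoints of some road
def AdjP (roads : List (List Int)) (x y : Int) : Prop :=
  ∃ r ∈ roads, (pvItem r 0 = x ∧ pvItem r 1 = y) ∨ (pvItem r 1 = x ∧ pvItem r 0 = y)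

lemma adjP_symm {roads : List (List Int)} {x y : Int} (h : AdjP roads x y) : AdjP roads y x := by
  obtain ⟨r, hr, hc⟩ := h
  exact ⟨r, hr, by tauto⟩

-- A side: membership in the built dict-of-sets is abstract adjacency
lemma memA (roads : List (List Int)) (d : PySem.Dict Int (PySem.Set Int)) (y x : Int) :
    x ∈ (roads.foldl pvAddRoad d).getD y [] ↔ x ∈ d.getD y [] ∨ AdjP roads y x := by
  induction roads generalizing d with
  | nil => simp [AdjP]
  | cons r rs ih =>
    rw [List.foldl_cons, ih]
    have hstep : ∀ z : Int, z ∈ (pvAddRoad d r).getD y [] ↔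
        z ∈ d.getD y [] ∨ (y = pvItem r 0 ∧ z = pvItem r 1) ∨ (y = pvItem r 1 ∧ z = pvItem r 0) := by
      intro z
      simp only [pvAddRoad, PySem.Dict.getD_modify]
      split_ifs <;> simp_all [PySem.Set.mem_add]
    rw [hstep]
    constructor
    · rintro ((h | h) | h)
      · exact Or.inl h
      · exact Or.inr ⟨r, List.mem_cons_self, by tauto⟩
      · exact Or.inr (by obtain ⟨r', hr', hc⟩ := h; exact ⟨r', List.mem_cons_of_mem _ hr', hc⟩)
    · rintro (h | ⟨r', hr', hc⟩)
      · exact Or.inl (Or.inl h)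
      · rcases List.mem_cons.mp hr' with rfl | hr'
        · exact Or.inl (Or.inr (by tauto))
        · exact Or.inr ⟨r', hr', hc⟩

-- A's pair test as a proposition
lemma checkA_iff (roads : List (List Int)) (i j : Int) :
    pvCheckA (roads.foldl pvAddRoad PySem.Dict.empty) i j = true ↔
      (AdjP roads j i ∨ AdjP roads i j ∨ ∃ u, AdjP roads i u ∧ AdjP roads j u) := by
  set v := roads.foldl pvAddRoad PySem.Dict.empty with hv
  simp only [pvCheckA, Bool.or_eq_true, PySem.Set.contains_iff, decide_eq_true_eq]
  have hlen : 1 ≤ PySem.Set.len (PySem.Set.inter (v.getD i []) (v.getD j [])) ↔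
      ∃ u, u ∈ v.getD i [] ∧ u ∈ v.getD j [] := by
    constructor
    · intro h
      have : PySem.Set.inter (v.getD i []) (v.getD j []) ≠ [] := by
        intro hnil; rw [PySem.Set.len, hnil] at h; simp at h
      obtain ⟨u, hu⟩ := List.exists_mem_of_ne_nil _ this
      exact ⟨u, (PySem.Set.mem_inter _ _ _).mp hu⟩
    · rintro ⟨u, h1, h2⟩
      have : u ∈ PySem.Set.inter (v.getD i []) (v.getD j []) :=
        (PySem.Set.mem_inter _ _ _).mpr ⟨h1, h2⟩
      have hp := List.length_pos_of_mem this
      rw [PySem.Set.len]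
      omega
  rw [hlen]
  simp only [hv, memA, PySem.Dict.getD_empty, List.not_mem_nil, false_or]
  tauto

-- A's fuel loops compute the nested range-alls
lemma innerA_eq_all (v : PySem.Dict Int (PySem.Set Int)) (n i : Int) :
    ∀ (fuel : Nat) (j : Int), fuel = (n - j).toNat →
      pvInnerA v i fuel j = (PySem.List.pyRange j n 1).all (fun j' => pvCheckA v i j') := by
  intro fuel
  induction fuel with
  | zero =>
    intro j hj
    rw [pvInnerA]
    symm
    rw [List.all_eq_true]
    intro x hx
    exact absurd (PySem.List.mem_pyRange_one.mp hx) (by omega)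
  | succ m ih =>
    intro j hj
    have hlt : j < n := by omega
    rw [pvInnerA, PySem.List.pyRange_one_cons hlt, List.all_cons]
    by_cases hc : pvCheckA v i j
    · rw [if_pos hc, hc, Bool.true_and, ih (j + 1) (by omega)]
    · rw [if_neg hc, (Bool.not_eq_true _).mp hc, Bool.false_and]

lemma outerA_eq_all (v : PySem.Dict Int (PySem.Set Int)) (n : Int) :
    ∀ (fuel : Nat) (i : Int), fuel = (n - i).toNat →
      pvOuterA v n fuel i = (PySem.List.pyRange i n 1).all (fun i' =>
        (PySem.List.pyRange (i' + 1) n 1).all (fun j' => pvCheckA v i' j')) := by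
  intro fuel
  induction fuel with
  | zero =>
    intro i hi
    rw [pvOuterA]
    symm
    rw [List.all_eq_true]
    intro x hx
    exact absurd (PySem.List.mem_pyRange_one.mp hx) (by omega)
  | succ m ih =>
    intro i hi
    have hlt : i < n := by omega
    rw [pvOuterA, PySem.List.pyRange_one_cons hlt, List.all_cons,
      innerA_eq_all v n i _ (i + 1) rfl]
    by_cases hc : (PySem.List.pyRange (i + 1) n 1).all (fun j' => pvCheckA v i j')
    · rw [if_pos hc, hc, Bool.true_and, ih (i + 1) (by omega)]
    · rw [if_neg hc, (Bool.not_eq_true _).mp hc, Bool.false_and]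

-- membership in a pairs list is abstract adjacency
lemma mem_pairs_iff (roads : List (List Int)) (y x : Int) :
    (y, x) ∈ pvPairs roads ↔ AdjP roads y x := by
  simp only [pvPairs, List.mem_flatMap, AdjP, List.mem_cons, List.not_mem_nil, or_false,
    Prod.mk.injEq]
  constructor
  · rintro ⟨r, hr, ⟨h1, h2⟩ | ⟨h1, h2⟩⟩
    · exact ⟨r, hr, Or.inl ⟨h1.symm, h2.symm⟩⟩
    · exact ⟨r, hr, Or.inr ⟨h1.symm, h2.symm⟩⟩
  · rintro ⟨r, hr, ⟨h1, h2⟩ | ⟨h1, h2⟩⟩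
    · exact ⟨r, hr, Or.inl ⟨h1.symm, h2.symm⟩⟩
    · exact ⟨r, hr, Or.inr ⟨h1.symm, h2.symm⟩⟩

-- B side: membership in the built adjacency lists is pair membership
lemma memB (l : List (Int × Int)) (d : PySem.Dict Int (List Int)) (c x : Int) :
    x ∈ (l.foldl (fun d p => d.modify p.1 [] (fun t => t ++ [p.2])) d).getD c [] ↔
      x ∈ d.getD c [] ∨ (c, x) ∈ l := by
  induction l generalizing d with
  | nil => simp
  | cons p t ih =>
    rw [List.foldl_cons, ih]
    have hstep : ∀ z : Int, z ∈ (d.modify p.1 [] (fun t => t ++ [p.2])).getD c [] ↔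
        z ∈ d.getD c [] ∨ (c = p.1 ∧ z = p.2) := by
      intro z
      rw [PySem.Dict.getD_modify]
      split_ifs with h <;> simp_all
    rw [hstep]
    constructor
    · rintro ((h | ⟨h1, h2⟩) | h)
      · exact Or.inl h
      · exact Or.inr (List.mem_cons.mpr (Or.inl (by rw [h1, h2])))
      · exact Or.inr (List.mem_cons.mpr (Or.inr h))
    · rintro (h | hm)
      · exact Or.inl (Or.inl h)
      · rcases List.mem_cons.mp hm with h | h
        · exact Or.inl (Or.inr (by subst h; exact ⟨rfl, rfl⟩))
        · exact Or.inr h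

lemma mem_adjB (roads : List (List Int)) (c x : Int) :
    x ∈ (pvAdjB roads).getD c [] ↔ AdjP roads c x := by
  rw [pvAdjB, memB, ← mem_pairs_iff]
  simp [PySem.Dict.getD_empty]

-- the adj dict has nodup keys
lemma adjB_keys_nodup (roads : List (List Int)) : (pvAdjB roads).keys.Nodup := by
  apply PySem.Dict.nodup_keys_foldl_modify_key
  simp [PySem.Dict.keys_empty]

-- the insert loop building 'one': lookups of untouched keys are unchanged …
lemma oneB_getD_not_mem (n : Int) (l : List (Int × List Int)) (d : PySem.Dict Int Nat)
    (u : Int) (hu : u ∉ l.map Prod.fst) :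
    (l.foldl (fun d p => d.insert p.1 (pvOrm n p.2)) d).getD u 0 = d.getD u 0 := by
  induction l generalizing d with
  | nil => rfl
  | cons p t ih =>
    rw [List.foldl_cons, ih _ (by simp at hu ⊢; exact hu.2)]
    rw [PySem.Dict.getD_insert]
    rw [if_neg (by simp at hu; exact hu.1)]

-- … and a key inserted once (keys are nodup) keeps its value
lemma oneB_getD_mem (n : Int) (l : List (Int × List Int)) :
    ∀ (d : PySem.Dict Int Nat) (u : Int) (nbrs : List Int),
      (l.map Prod.fst).Nodup → (u, nbrs) ∈ l →
      (l.foldl (fun d p => d.insert p.1 (pvOrm n p.2)) d).getD u 0 = pvOrm n nbrs := by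
  induction l with
  | nil =>
    intro d u nbrs _ hmem
    exact absurd hmem List.not_mem_nil
  | cons p t ih =>
    intro d u nbrs hnd hmem
    rw [List.map_cons, List.nodup_cons] at hnd
    rw [List.foldl_cons]
    rcases List.mem_cons.mp hmem with h | h
    · subst h
      rw [oneB_getD_not_mem n t _ u hnd.1, PySem.Dict.getD_insert]
      simp
    · exact ih _ u nbrs hnd.2 h

-- the one-hop-mask dict agrees with pvOrm of the adjacency list at every key
lemma oneB_getD (n : Int) (roads : List (List Int)) (u : Int) :
    (pvOneB n (pvAdjB roads)).getD u 0 = pvOrm n ((pvAdjB roads).getD u []) := by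
  set adj := pvAdjB roads with hadj
  have hnd : (adj.items.map Prod.fst).Nodup := adjB_keys_nodup roads
  by_cases hu : u ∈ adj.items.map Prod.fst
  · obtain ⟨p, hp, hp1⟩ := List.mem_map.mp hu
    have hp' : (u, p.2) ∈ adj.items := by
      rw [show (u, p.2) = p from by rw [← hp1]]
      exact hp
    have h1 : adj.getD u [] = p.2 := PySem.Dict.getD_of_mem_items _ hp' hnd []
    rw [pvOneB, oneB_getD_mem n adj.items _ u p.2 hnd hp', h1]
  · have h1 : adj.getD u [] = [] := by
      apply PySem.Dict.getD_of_not_contains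
      rw [PySem.Dict.contains_eq_decide_mem_keys]
      simpa [PySem.Dict.keys] using hu
    rw [pvOneB, oneB_getD_not_mem n adj.items _ u hu, h1, PySem.Dict.getD_empty]
    rfl

-- bits of low
lemma low_testBit (n x : Int) (k : Nat) :
    (pvLow n x).testBit k ↔ x = (k : Int) ∧ (k : Int) < n := by
  rw [pvLow]
  split_ifs with h
  · rw [Nat.one_shiftLeft, Nat.testBit_two_pow]
    simp only [decide_eq_true_eq]
    omega
  · simp only [Nat.zero_testBit, Bool.false_eq_true, false_iff]
    omega

-- bits of an OR-accumulating fold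
lemma foldl_or_testBit (f : Int → Nat) (l : List Int) (a : Nat) (k : Nat) :
    (l.foldl (fun m w => m ||| f w) a).testBit k ↔ a.testBit k ∨ ∃ w ∈ l, (f w).testBit k := by
  induction l generalizing a with
  | nil => simp
  | cons w t ih =>
    rw [List.foldl_cons, ih]
    simp only [Nat.testBit_or, Bool.or_eq_true, List.mem_cons]
    constructor
    · rintro ((h | h) | ⟨w', hw', h⟩)
      · exact Or.inl h
      · exact Or.inr ⟨w, Or.inl rfl, h⟩
      · exact Or.inr ⟨w', Or.inr hw', h⟩
    · rintro (h | ⟨w', rfl | hw', h⟩)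
      · exact Or.inl (Or.inl h)
      · exact Or.inl (Or.inr h)
      · exact Or.inr ⟨w', hw', h⟩

-- bits of the one-hop mask of node u: exactly u's in-range neighbours
lemma orm_testBit (n : Int) (roads : List (List Int)) (u : Int) (k : Nat) :
    (pvOrm n ((pvAdjB roads).getD u [])).testBit k ↔
      AdjP roads u (k : Int) ∧ (k : Int) < n := by
  rw [pvOrm, foldl_or_testBit]
  simp only [Nat.zero_testBit, Bool.false_eq_true, false_or]
  constructor
  · rintro ⟨w, hw, hb⟩
    obtain ⟨rfl, hk⟩ := (low_testBit n w k).mp hb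
    exact ⟨(mem_adjB roads u _).mp hw, hk⟩
  · rintro ⟨hadj, hk⟩
    exact ⟨(k : Int), (mem_adjB roads u _).mpr hadj, (low_testBit n _ k).mpr ⟨rfl, hk⟩⟩

-- bits of B's row mask: the two-hop closed neighbourhood of i, restricted to range(n)
lemma row_testBit (n : Int) (roads : List (List Int)) (i : Int) (k : Nat) :
    (pvRow n (pvAdjB roads) (pvOneB n (pvAdjB roads)) i).testBit k ↔
      ((k : Int) < n ∧
        ((k : Int) = i ∨ AdjP roads i (k : Int) ∨
          ∃ u, AdjP roads i u ∧ AdjP roads u (k : Int))) := by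
  rw [pvRow, foldl_or_testBit]
  simp only [Nat.testBit_or, Bool.or_eq_true, oneB_getD, orm_testBit, low_testBit]
  constructor
  · rintro ((⟨rfl, hk⟩ | ⟨ha, hk⟩) | ⟨u, hu, (⟨rfl, hk⟩ | ⟨ha, hk⟩)⟩)
    · exact ⟨hk, Or.inl rfl⟩
    · exact ⟨hk, Or.inr (Or.inl ha)⟩
    · exact ⟨hk, Or.inr (Or.inl ((mem_adjB roads i _).mp hu))⟩
    · exact ⟨hk, Or.inr (Or.inr ⟨u, (mem_adjB roads i _).mp hu, ha⟩)⟩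
  · rintro ⟨hk, rfl | ha | ⟨u, h1, h2⟩⟩
    · exact Or.inl (Or.inl ⟨rfl, hk⟩)
    · exact Or.inl (Or.inr ⟨ha, hk⟩)
    · exact Or.inr ⟨u, (mem_adjB roads i _).mpr h1, Or.inr ⟨h2, hk⟩⟩

-- the full-mask test: covering every bit below n
lemma row_eq_full_iff (n : Int) (roads : List (List Int)) (i : Int) :
    (pvRow n (pvAdjB roads) (pvOneB n (pvAdjB roads)) i = (1 <<< n.toNat) - 1) ↔
      ∀ k : Nat, (k : Int) < n →
        ((k : Int) = i ∨ AdjP roads i (k : Int) ∨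
          ∃ u, AdjP roads i u ∧ AdjP roads u (k : Int)) := by
  rw [Nat.one_shiftLeft]
  constructor
  · intro h k hk
    have hb : (pvRow n (pvAdjB roads) (pvOneB n (pvAdjB roads)) i).testBit k = true := by
      rw [h, Nat.testBit_two_pow_sub_one]
      simp only [decide_eq_true_eq]
      omega
    exact ((row_testBit n roads i k).mp hb).2
  · intro h
    apply Nat.eq_of_testBit_eq
    intro k
    rw [Nat.testBit_two_pow_sub_one]
    by_cases hk : (k : Int) < n
    · rw [(row_testBit n roads i k).mpr ⟨hk, h k hk⟩, eq_comm, decide_eq_true_eq]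
      omega
    · rw [Bool.eq_iff_iff, row_testBit, decide_eq_true_eq]
      constructor
      · intro hcontra
        exact absurd hcontra.1 hk
      · intro hlt
        exact absurd (by omega : (k : Int) < n) hk

-- B's fuel loop computes the range-all of the full-mask tests
lemma loopB_eq_all (n : Int) (adj : PySem.Dict Int (List Int)) (one : PySem.Dict Int Nat)
    (full : Nat) :
    ∀ (fuel : Nat) (i : Int), fuel = (n - i).toNat →
      pvLoopB n adj one full fuel i =
        (PySem.List.pyRange i n 1).all (fun i' => decide (pvRow n adj one i' = full)) := by
  intro fuel
  induction fuel with
  | zero =>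
    intro i hi
    rw [pvLoopB]
    symm
    rw [List.all_eq_true]
    intro x hx
    exact absurd (PySem.List.mem_pyRange_one.mp hx) (by omega)
  | succ m ih =>
    intro i hi
    have hlt : i < n := by omega
    rw [pvLoopB, PySem.List.pyRange_one_cons hlt, List.all_cons]
    by_cases hc : pvRow n adj one i = full
    · rw [if_pos hc, decide_eq_true hc, Bool.true_and, ih (i + 1) (by omega)]
    · rw [if_neg hc, decide_eq_false hc, Bool.false_and]

-- ===== VERDICT (by name: the statement is the Claim_ definition above) =====
theorem efficientRoadNetwork_spec : Claim_equal_efficientRoadNetwork := by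
  intro n roads _ _
  unfold Spec_efficientRoadNetwork
  simp only [efficientRoadNetwork, efficientRoadNetwork_alt]
  rw [outerA_eq_all _ n n.toNat 0 (by omega), loopB_eq_all n _ _ _ n.toNat 0 (by omega)]
  rw [Bool.eq_iff_iff]
  simp only [List.all_eq_true, decide_eq_true_eq]
  constructor
  · -- A's pairwise condition gives B's two-hop coverage
    intro hA i hi
    have hi' := PySem.List.mem_pyRange_one.mp hi
    rw [row_eq_full_iff]
    intro k hk
    rcases lt_trichotomy ((k : Int)) i with hki | hki | hki
    · -- k < i: use A at the pair (k, i)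
      have hmem : (k : Int) ∈ PySem.List.pyRange 0 n 1 :=
        PySem.List.mem_pyRange_one.mpr ⟨by positivity, hk⟩
      have himem : i ∈ PySem.List.pyRange ((k : Int) + 1) n 1 :=
        PySem.List.mem_pyRange_one.mpr ⟨by omega, by omega⟩
      have hC := hA _ hmem _ himem
      rcases (checkA_iff roads _ _).mp hC with h | h | ⟨u, h1, h2⟩
      · exact Or.inr (Or.inl h)
      · exact Or.inr (Or.inl (adjP_symm h))
      · exact Or.inr (Or.inr ⟨u, h2, adjP_symm h1⟩)
    · exact Or.inl hki
    · -- i < k: use A at the pair (i, k)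
      have hjmem : (k : Int) ∈ PySem.List.pyRange (i + 1) n 1 :=
        PySem.List.mem_pyRange_one.mpr ⟨by omega, hk⟩
      have hC := hA _ hi _ hjmem
      rcases (checkA_iff roads _ _).mp hC with h | h | ⟨u, h1, h2⟩
      · exact Or.inr (Or.inl (adjP_symm h))
      · exact Or.inr (Or.inl h)
      · exact Or.inr (Or.inr ⟨u, h1, adjP_symm h2⟩)
  · -- B's two-hop coverage gives A's pairwise condition
    intro hB i hi j hj
    have hi' := PySem.List.mem_pyRange_one.mp hi
    have hj' := PySem.List.mem_pyRange_one.mp hj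
    have hcov := (row_eq_full_iff n roads i).mp (hB i hi) j.toNat (by omega)
    rw [checkA_iff]
    have hjc : ((j.toNat : Nat) : Int) = j := by omega
    rw [hjc] at hcov
    rcases hcov with h | h | ⟨u, h1, h2⟩
    · omega
    · exact Or.inr (Or.inl h)
    · exact Or.inr (Or.inr ⟨u, h1, adjP_symm h2⟩)
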